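-- pv_equiv track=rewrite | github.com/veer-mehta/joqer-engine | decide.py | get_discard_indices
-- ===== SOURCE A (Python) =====
-- def get_discard_indices(old_hand, new_hand):
--
-- 	removed = []
-- 	used = [False] * len(new_hand)
--
-- 	for i, card in enumerate(old_hand):
--
-- 		found = False
--
-- 		for j, nc in enumerate(new_hand):
--
-- 			if not used[j] and nc == card:
--
-- 				used[j] = True
-- 				found = True
-- 				break
--
-- 		if not found:
--
-- 			removed.append(i)
--
-- 	return removed
-- ===== SOURCE B (Python) =====
-- def get_discard_indices(old_hand, new_hand):
--     remaining = {}
--     for c in new_hand: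
--         remaining[c] = remaining.get(c, 0) + 1
--     removed = []
--     for i, card in enumerate(old_hand):
--         c = remaining.get(card, 0)
--         if c > 0:
--             remaining[card] = c - 1
--         else:
--             removed.append(i)
--     return removed
-- ===== Notes on version B (the rewrite author's own statement) =====
-- stated objective: faster
-- what changed: Replaces the nested scan over new_hand with a used-flag array by a multiplicity dict of new_hand built once and decremented in a single pass over old_hand.
import Mathlib
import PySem

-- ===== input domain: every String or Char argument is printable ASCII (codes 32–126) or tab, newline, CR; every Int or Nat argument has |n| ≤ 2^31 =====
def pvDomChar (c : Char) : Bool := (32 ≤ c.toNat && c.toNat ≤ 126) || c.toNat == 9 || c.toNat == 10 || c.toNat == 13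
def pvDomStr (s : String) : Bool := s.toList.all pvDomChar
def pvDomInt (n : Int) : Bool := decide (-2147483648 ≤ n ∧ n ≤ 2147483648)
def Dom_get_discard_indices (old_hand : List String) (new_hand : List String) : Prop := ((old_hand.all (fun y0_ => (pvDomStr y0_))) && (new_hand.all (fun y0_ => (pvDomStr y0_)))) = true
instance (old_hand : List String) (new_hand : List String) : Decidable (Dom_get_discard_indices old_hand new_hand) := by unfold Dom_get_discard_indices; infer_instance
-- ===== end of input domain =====

-- B replaces A's inner scan of new_hand with used-flags by a multiplicity dict of
-- new_hand built once and decremented in one pass over old_hand (objective: faster).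

-- ===== PORT A =====
-- inner 'for j, nc in enumerate(new_hand): if not used[j] and nc == card: break';
-- the state carries new_hand zipped with its used-flags.
def aFind (card : String) : List (String × Bool) → Nat → Option Nat
  | [], _ => none
  | (nc, u) :: rest, j => if !u && nc == card then some j else aFind card rest (j + 1)

-- 'used[j] = True'
def aMark : List (String × Bool) → Nat → List (String × Bool)
  | [], _ => []
  | p :: rest, 0 => (p.1, true) :: rest
  | p :: rest, n + 1 => p :: aMark rest n

def aLoop : List String → Nat → List (String × Bool) → List Int → List Int
  | [], _, _, removed => removed
  | card :: rest, i, st, removed =>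
    match aFind card st 0 with
    | some j => aLoop rest (i + 1) (aMark st j) removed
    | none => aLoop rest (i + 1) st (removed ++ [(i : Int)])

def get_discard_indices (old_hand : List String) (new_hand : List String) : List Int :=
  aLoop old_hand 0 (new_hand.map (fun c => (c, false))) []

-- ===== PORT B =====
def bLoop : List String → Nat → PySem.Dict String Int → List Int → List Int
  | [], _, _, removed => removed
  | card :: rest, i, d, removed =>
    let c := d.getD card 0
    if c > 0 then bLoop rest (i + 1) (d.insert card (c - 1)) removed
    else bLoop rest (i + 1) d (removed ++ [(i : Int)])

def get_discard_indices_alt (old_hand : List String) (new_hand : List String) : List Int :=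
  bLoop old_hand 0
    (new_hand.foldl (fun d c => d.insert c (d.getD c 0 + 1)) PySem.Dict.empty) []

-- ===== PRECONDITION & SPEC =====
def Spec_get_discard_indices (old_hand : List String) (new_hand : List String) (out : List Int) : Prop := out = get_discard_indices_alt old_hand new_hand
instance (old_hand : List String) (new_hand : List String) (out : List Int) : Decidable (Spec_get_discard_indices old_hand new_hand out) := by unfold Spec_get_discard_indices; infer_instance

-- ===== CLAIM (what is proved, stated in full; the proofs are below) =====
def Claim_equal_get_discard_indices : Prop := ∀ (old_hand : List String) (new_hand : List String), Dom_get_discard_indices old_hand new_hand → Spec_get_discard_indices old_hand new_hand (get_discard_indices old_hand new_hand)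

-- ===== LEMMAS AND PROOFS =====

-- number of still-unused positions of value v in A's state
def cntU (st : List (String × Bool)) (v : String) : Nat :=
  st.countP (fun p => p.1 == v && !p.2)

theorem aFind_none (card : String) : ∀ (st : List (String × Bool)) (j : Nat),
    aFind card st j = none → cntU st card = 0 := by
  intro st
  induction st with
  | nil => intro j _; simp [cntU]
  | cons p rest ih =>
    obtain ⟨nc, u⟩ := p
    intro j h
    simp only [aFind] at h
    by_cases hc : (!u && nc == card) = true
    · simp [hc] at h
    · rw [if_neg hc] at h
      have hhead : (nc == card && !u) = false := by
        revert hc; cases h1 : (nc == card) <;> cases u <;> simp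
      simp only [cntU, List.countP_cons, hhead, if_false]
      simpa [cntU] using ih _ h

theorem aFind_some (card : String) : ∀ (st : List (String × Bool)) (j k : Nat),
    aFind card st j = some k →
    j ≤ k ∧ 0 < cntU st card ∧
    cntU (aMark st (k - j)) card + 1 = cntU st card ∧
    ∀ v, v ≠ card → cntU (aMark st (k - j)) v = cntU st v := by
  intro st
  induction st with
  | nil => intro j k h; simp [aFind] at h
  | cons p rest ih =>
    obtain ⟨nc, u⟩ := p
    intro j k h
    simp only [aFind] at h
    by_cases hc : (!u && nc == card) = true
    · rw [if_pos hc] at h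
      obtain rfl : j = k := by simpa using h
      obtain ⟨hu, hnc⟩ := Bool.and_eq_true_iff.mp hc
      have hnc' : nc = card := by simpa using hnc
      refine ⟨le_refl _, ?_, ?_, ?_⟩
      · simp [Nat.sub_self, aMark, cntU, List.countP_cons, hnc', hu]
      · simp [Nat.sub_self, aMark, cntU, List.countP_cons, hnc', hu]
      · intro v hv
        have hne : (nc == v) = false := by
          simp [hnc']; exact fun h' => hv h'.symm
        simp [Nat.sub_self, aMark, cntU, List.countP_cons, hne]
    · rw [if_neg hc] at h
      obtain ⟨hjk, hpos, heq, hne⟩ := ih (j + 1) k h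
      have hhead : (nc == card && !u) = false := by
        revert hc; cases h1 : (nc == card) <;> cases u <;> simp
      have hk : j ≤ k := by omega
      have hsub : k - j = (k - (j + 1)) + 1 := by omega
      refine ⟨hk, ?_, ?_, ?_⟩
      · simp only [cntU, List.countP_cons, hhead, if_false] at *
        omega
      · rw [hsub]
        simp only [cntU, List.countP_cons, hhead, if_false, aMark] at *
        omega
      · intro v hv
        have hv' := hne v hv
        rw [hsub]
        simp only [cntU, List.countP_cons, aMark] at *
        omega

theorem loop_eq : ∀ (old : List String) (i : Nat) (st : List (String × Bool))
    (d : PySem.Dict String Int) (removed : List Int),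
    (∀ v, d.getD v 0 = (cntU st v : Int)) →
    aLoop old i st removed = bLoop old i d removed := by
  intro old
  induction old with
  | nil => intro i st d removed _; simp [aLoop, bLoop]
  | cons card rest ih =>
    intro i st d removed hR
    simp only [aLoop, bLoop]
    cases hfind : aFind card st 0 with
    | some j =>
      obtain ⟨_, hpos, heq, hne⟩ := aFind_some card st 0 j hfind
      rw [Nat.sub_zero] at heq hne
      have hc : d.getD card 0 > 0 := by rw [hR card]; exact_mod_cast hpos
      rw [if_pos hc]
      apply ih
      intro v
      rw [PySem.Dict.getD_insert]
      by_cases hv : v = card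
      · rw [if_pos hv, hR card, hv]
        have h1 : (cntU (aMark st j) card : Int) + 1 = (cntU st card : Int) := by
          exact_mod_cast heq
        omega
      · rw [if_neg hv, hR v, hne v hv]
    | none =>
      have h0 : cntU st card = 0 := aFind_none card st 0 hfind
      have hc : ¬ d.getD card 0 > 0 := by rw [hR card, h0]; simp
      rw [if_neg hc]
      exact ih _ _ _ _ hR

theorem init_inv (new_hand : List String) (v : String) :
    (new_hand.foldl (fun (d : PySem.Dict String Int) c => d.insert c (d.getD c 0 + 1))
        PySem.Dict.empty).getD v 0
      = ((cntU (new_hand.map (fun c => (c, false))) v : Nat) : Int) := by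
  rw [PySem.Dict.foldl_insert_getD_add_one_eq_counter, PySem.Dict.getD_counter]
  simp only [cntU, List.countP_map, List.count_eq_countP, Function.comp_def, Bool.not_false,
    Bool.and_true]

-- ===== VERDICT (by name: the statement is the Claim_ definition above) =====
theorem get_discard_indices_spec : Claim_equal_get_discard_indices := by
  intro old_hand new_hand _
  unfold Spec_get_discard_indices get_discard_indices get_discard_indices_alt
  exact loop_eq old_hand 0 _ _ [] (fun v => init_inv new_hand v)
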